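-- pv_equiv track=rewrite | github.com/yangxiang12/daily_practice | 2020-07-01/p2.py | solution
-- ===== SOURCE A (Python) =====
-- def solution(nums, target):
--     if target not in nums:
--         return []
--
--     stack = [target]
--     mid = nums.index(target)
--
--     length = len(nums)
--     left, right = mid, mid
--     for _ in range(length):
--         left -= 1
--         right += 1
--
--         if left >= 0:
--             stack.append(nums[left])
--
--         if right < length:
--             stack.append(nums[right])
--
--     return stack
-- ===== SOURCE B (Python) =====
-- def solution(nums, target):
--     if target not in nums:
--         return []
--     mid = nums.index(target)
--     left = nums[:mid][::-1]
--     right = nums[mid + 1:]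
--     out = [target]
--     for l, r in zip(left, right):
--         out.append(l)
--         out.append(r)
--     k = min(len(left), len(right))
--     tail = left[k:] or right[k:]
--     return out + tail
-- ===== Notes on version B (the rewrite author's own statement) =====
-- stated objective: alternative
-- what changed: Replaces A's length-counted loop that walks two indices outward from the target with a slice-based decomposition: reverse the prefix before the target, take the suffix after it, interleave them pairwise with zip and append the leftover of the longer side.
import Mathlib
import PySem

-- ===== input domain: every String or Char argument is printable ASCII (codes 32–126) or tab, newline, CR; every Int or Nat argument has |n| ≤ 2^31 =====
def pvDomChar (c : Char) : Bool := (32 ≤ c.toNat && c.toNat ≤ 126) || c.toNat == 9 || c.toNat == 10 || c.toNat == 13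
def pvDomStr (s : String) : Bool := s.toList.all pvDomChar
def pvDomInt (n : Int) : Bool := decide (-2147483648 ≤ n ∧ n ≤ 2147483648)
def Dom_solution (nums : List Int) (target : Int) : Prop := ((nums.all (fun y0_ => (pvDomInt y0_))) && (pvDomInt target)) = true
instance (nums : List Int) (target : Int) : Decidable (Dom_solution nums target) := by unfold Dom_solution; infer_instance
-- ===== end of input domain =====

-- B replaces A's counted index-walking loop by slicing the list around the target and
-- interleaving the reversed left part with the right part (alternative decomposition; same cost).

-- ===== PORT A =====
def solution (nums : List Int) (target : Int) : List Int :=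
  if target ∉ nums then []
  else
    match PySem.List.index? nums target with
    | none => []   -- unreachable: the guard ensures target ∈ nums
    | some mid =>
      let length : Int := nums.length
      let st := (PySem.List.pyRange 0 length 1).foldl
        (fun (st : List Int × Int × Int) _ =>
          let left := st.2.1 - 1
          let right := st.2.2 + 1
          let stack := if left ≥ 0 then st.1 ++ [PySem.List.pyGetD nums left 0] else st.1
          let stack := if right < length then stack ++ [PySem.List.pyGetD nums right 0] else stack
          (stack, left, right))
        ([target], (mid : Int), (mid : Int))
      st.1

-- ===== PORT B =====
def solution_alt (nums : List Int) (target : Int) : List Int :=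
  if target ∉ nums then []
  else
    match PySem.List.index? nums target with
    | none => []   -- unreachable: the guard ensures target ∈ nums
    | some mid =>
      -- nums[:mid][::-1] ([::-1] is list reversal: PySem.List.slice?_none_none_neg_one)
      let left := (PySem.List.slice? (PySem.List.slice nums none (some (mid : Int))) none none (-1)).getD []
      let right := PySem.List.slice nums (some ((mid : Int) + 1)) none
      let out := (left.zip right).foldl (fun out lr => out ++ [lr.1, lr.2]) [target]
      let k := min left.length right.length
      let tail := if left.drop k ≠ [] then left.drop k else right.drop k
      out ++ tail

-- ===== PRECONDITION & SPEC =====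
def Spec_solution (nums : List Int) (target : Int) (out : List Int) : Prop := out = solution_alt nums target
instance (nums : List Int) (target : Int) (out : List Int) : Decidable (Spec_solution nums target out) := by unfold Spec_solution; infer_instance

-- ===== CLAIM (what is proved, stated in full; the proofs are below) =====
def Claim_equal_solution : Prop := ∀ (nums : List Int) (target : Int), Dom_solution nums target → Spec_solution nums target (solution nums target)

-- ===== LEMMAS AND PROOFS =====

-- interleave two lists, left element first; the common value both programs compute
def ilv : List Int → List Int → List Int
  | [], ys => ys
  | x :: xs, [] => x :: xs
  | x :: xs, y :: ys => x :: y :: ilv xs ys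

theorem ilv_nil_right (xs : List Int) : ilv xs [] = xs := by
  cases xs <;> rfl

theorem ilv_take_succ (k : Nat) (L R : List Int) :
    ilv (L.take (k+1)) (R.take (k+1)) =
      ilv (L.take k) (R.take k) ++ (L[k]?).toList ++ (R[k]?).toList := by
  induction k generalizing L R with
  | zero =>
    cases L <;> cases R <;> simp [ilv]
  | succ k ih =>
    cases L with
    | nil => simp [ilv, List.take_add_one]
    | cons x L' =>
      cases R with
      | nil => simp [ilv_nil_right, List.take_add_one]
      | cons y R' =>
        simp only [List.take_succ_cons, ilv, List.getElem?_cons_succ]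
        rw [ih L' R']
        simp

theorem step_stack (S : List Int) (c1 c2 : Prop) [Decidable c1] [Decidable c2] (v1 v2 : Int) :
    (if c2 then (if c1 then S ++ [v1] else S) ++ [v2] else (if c1 then S ++ [v1] else S))
      = S ++ (if c1 then [v1] else []) ++ (if c2 then [v2] else []) := by
  split <;> split <;> simp

-- B's zip-fold plus leftover tail is exactly the interleaving
theorem zipfold_ilv (L R acc : List Int) :
    ((L.zip R).foldl (fun out lr => out ++ [lr.1, lr.2]) acc) ++
      (if L.drop (min L.length R.length) ≠ [] then L.drop (min L.length R.length)
       else R.drop (min L.length R.length)) = acc ++ ilv L R := by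
  induction L generalizing R acc with
  | nil => simp [ilv]
  | cons x L' ih =>
    cases R with
    | nil => simp [ilv_nil_right]
    | cons y R' =>
      have := ih R' (acc ++ [x, y])
      simp [List.zip, ilv, Nat.succ_min_succ] at this ⊢
      simpa using this

-- A's loop after k rounds: state is (target :: ilv of the first k left/right elements, mid-k, mid+k)
theorem A_loop (nums : List Int) (t : Int) (mid : Nat) (hmid : mid < nums.length)
    (k : Nat) (hk : k ≤ nums.length) :
    (PySem.List.pyRange 0 (k : Int) 1).foldl
        (fun (st : List Int × Int × Int) _ =>
          let left := st.2.1 - 1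
          let right := st.2.2 + 1
          let stack := if left ≥ 0 then st.1 ++ [PySem.List.pyGetD nums left 0] else st.1
          let stack := if right < (nums.length : Int) then stack ++ [PySem.List.pyGetD nums right 0] else stack
          (stack, left, right))
        ([t], (mid : Int), (mid : Int))
      = (t :: ilv (((nums.take mid).reverse).take k) ((nums.drop (mid+1)).take k),
         (mid : Int) - k, (mid : Int) + k) := by
  induction k with
  | zero => simp [ilv]
  | succ k ih =>
    have hk' : k ≤ nums.length := Nat.le_of_succ_le hk
    have hstep : ((k+1 : Nat) : Int) = (k : Int) + 1 := by push_cast; ring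
    rw [hstep, PySem.List.pyRange_one_succ_right (by positivity), List.foldl_append, ih hk',
        List.foldl_cons, List.foldl_nil]
    have hL : (if ((mid : Int) - (k:Int) - 1) ≥ 0
               then [PySem.List.pyGetD nums ((mid : Int) - (k:Int) - 1) 0] else ([] : List Int))
              = (((nums.take mid).reverse)[k]?).toList := by
      by_cases h : k < mid
      · have h0 : (0:Int) ≤ (mid : Int) - (k:Int) - 1 := by omega
        rw [if_pos (by omega), PySem.List.pyGetD_eq_getElem nums 0 (by omega) (by omega)]
        have hk2 : k < ((nums.take mid).reverse).length := by
          simp; omega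
        rw [List.getElem?_eq_getElem hk2]
        simp only [Option.toList_some]
        congr 1
        rw [List.getElem_reverse, List.getElem_take]
        congr 1
        simp only [List.length_take]
        omega
      · rw [if_neg (by omega), List.getElem?_eq_none (by simp; omega)]
        rfl
    have hR : (if ((mid : Int) + (k:Int) + 1) < (nums.length : Int)
               then [PySem.List.pyGetD nums ((mid : Int) + (k:Int) + 1) 0] else ([] : List Int))
              = ((nums.drop (mid+1))[k]?).toList := by
      by_cases h : mid + k + 1 < nums.length
      · have h0 : (0:Int) ≤ (mid : Int) + (k:Int) + 1 := by positivity
        rw [if_pos (by omega), PySem.List.pyGetD_eq_getElem nums 0 (by omega) (by omega)]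
        have hk2 : k < (nums.drop (mid+1)).length := by simp; omega
        rw [List.getElem?_eq_getElem hk2]
        simp only [Option.toList_some]
        congr 1
        rw [List.getElem_drop]
        congr 1
        omega
      · rw [if_neg (by omega), List.getElem?_eq_none (by simp; omega)]
        rfl
    refine Prod.ext ?_ (Prod.ext (by simp; ring) (by simp; ring))
    simp only [step_stack, hL, hR]
    rw [ilv_take_succ]
    simp

theorem take_len_le {L : List Int} {n : Nat} (h : L.length ≤ n) : L.take n = L :=
  List.take_of_length_le h

-- ===== VERDICT (by name: the statement is the Claim_ definition above) =====
theorem solution_spec : Claim_equal_solution := by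
  intro nums target _
  unfold Spec_solution solution solution_alt
  by_cases hmem : target ∈ nums
  · rw [if_neg (not_not_intro hmem), if_neg (not_not_intro hmem)]
    obtain ⟨mid, hidx⟩ := Option.isSome_iff_exists.mp
      ((PySem.List.index?_isSome_iff nums target).mpr hmem)
    rw [hidx]
    obtain ⟨hmid, -, -⟩ := PySem.List.getElem_of_index?_eq_some hidx
    simp only
    -- A's side: run the loop lemma for the full length of the list
    rw [A_loop nums target mid hmid nums.length le_rfl]
    simp only
    -- B's side: identify the slices
    rw [PySem.List.slice?_none_none_neg_one, Option.getD_some, PySem.List.slice_to_natCast,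
        show ((mid : Int) + 1) = ((mid + 1 : Nat) : Int) by push_cast; ring,
        PySem.List.slice_from_natCast]
    rw [zipfold_ilv]
    have h1 : ((List.take mid nums).reverse).take nums.length = (List.take mid nums).reverse :=
      take_len_le (by simp)
    have h2 : (List.drop (mid+1) nums).take nums.length = List.drop (mid+1) nums :=
      take_len_le (by simp)
    rw [h1, h2]
    rfl
  · rw [if_pos hmem, if_pos hmem]
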